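-- pv_equiv track=rewrite | github.com/LuWenTao529/xmlclass | OpenWordMLTC/keyword_generator/dynamic_GMM.py | label_cleaning
-- ===== SOURCE A (Python) =====
-- def label_cleaning(label):
--     if "[label]" in label and "[/label]" in label:
--         tokens = label.split('"')
--         clean = "; ".join(tokens[i] for i in range(1, len(tokens) - 1, 2))
--         return clean + ";\n"
--     if "coarse-grained " in label and "fine-grained " in label:
--         coarse = label.split("coarse-grained ")[1].split("fine-grained ")[0].split('"')
--         fine = label.split("fine-grained ")[1].split(".")[0].split('"')
--         coarse_labels = [coarse[i] for i in range(1, len(coarse) - 1, 2)]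
--         fine_labels = [fine[i] for i in range(1, len(fine) - 1, 2)]
--         return "; ".join(coarse_labels + fine_labels) + ";\n"
--     if "the label for " in label:
--         tokens = label.split("the label for ")[1].split(".")[0].split('"')
--         clean = "; ".join(tokens[i] for i in range(1, len(tokens) - 1, 2))
--         return clean + ";\n"
--     return label.strip() + "\n"
-- ===== SOURCE B (Python) =====
-- def _quoted(s):
--     # single pass: collect the contents of each matched pair of double quotes
--     out = []
--     buf = []
--     inq = False
--     for ch in s:
--         if ch == '"':
--             if inq:
--                 out.append("".join(buf))
--             buf = []
--             inq = not inq
--         elif inq: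
--             buf.append(ch)
--     return out
--
--
-- def label_cleaning(label):
--     if "[label]" in label and "[/label]" in label:
--         return "; ".join(_quoted(label)) + ";\n"
--     if "coarse-grained " in label and "fine-grained " in label:
--         coarse = label.split("coarse-grained ")[1].split("fine-grained ")[0]
--         fine = label.split("fine-grained ")[1].split(".")[0]
--         return "; ".join(_quoted(coarse) + _quoted(fine)) + ";\n"
--     if "the label for " in label:
--         return "; ".join(_quoted(label.split("the label for ")[1].split(".")[0])) + ";\n"
--     return label.strip() + "\n"
-- ===== Notes on version B (the rewrite author's own statement) =====
-- stated objective: alternative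
-- what changed: Replaces A's split-on-quote plus stride-2 index comprehension (tokens[i] for i in range(1, len(tokens)-1, 2)) with a single-pass state-machine scan that collects the contents of matched quote pairs directly; the guard branches and substring carving are kept.
import Mathlib
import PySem

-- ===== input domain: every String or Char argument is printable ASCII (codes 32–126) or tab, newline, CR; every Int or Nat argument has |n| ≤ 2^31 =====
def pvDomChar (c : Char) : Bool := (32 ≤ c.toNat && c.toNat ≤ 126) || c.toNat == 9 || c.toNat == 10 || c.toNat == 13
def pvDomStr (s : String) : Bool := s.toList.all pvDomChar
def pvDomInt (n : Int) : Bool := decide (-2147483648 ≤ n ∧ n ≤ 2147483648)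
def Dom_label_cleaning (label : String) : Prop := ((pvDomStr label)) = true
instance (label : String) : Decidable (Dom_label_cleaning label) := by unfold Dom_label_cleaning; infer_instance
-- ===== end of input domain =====

-- B replaces A's split-on-quote + stride-2 index comprehension by a single-pass state-machine scan
-- collecting the contents of matched quote pairs (objective: alternative, same cost).

-- ===== PORT A =====
-- literal port of A; the [1]/[0] indexings are guarded by the `in` checks (always in range),
-- so `.getD ""` is never the defaulting case on inputs reaching it.
def label_cleaning (label : String) : String :=
  if PySem.Str.isIn "[label]" label && PySem.Str.isIn "[/label]" label then
    let tokens := (PySem.Str.split? label "\"").getD []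
    let clean := PySem.Str.join "; " ((PySem.List.pyRange 1 ((tokens.length : Int) - 1) 2).map
      (fun i => (PySem.List.pyGet? tokens i).getD ""))
    clean ++ ";\n"
  else if PySem.Str.isIn "coarse-grained " label && PySem.Str.isIn "fine-grained " label then
    let c1 := (PySem.List.pyGet? ((PySem.Str.split? label "coarse-grained ").getD []) 1).getD ""
    let c2 := (PySem.List.pyGet? ((PySem.Str.split? c1 "fine-grained ").getD []) 0).getD ""
    let coarse := (PySem.Str.split? c2 "\"").getD []
    let f1 := (PySem.List.pyGet? ((PySem.Str.split? label "fine-grained ").getD []) 1).getD ""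
    let f2 := (PySem.List.pyGet? ((PySem.Str.split? f1 ".").getD []) 0).getD ""
    let fine := (PySem.Str.split? f2 "\"").getD []
    let coarse_labels := (PySem.List.pyRange 1 ((coarse.length : Int) - 1) 2).map
      (fun i => (PySem.List.pyGet? coarse i).getD "")
    let fine_labels := (PySem.List.pyRange 1 ((fine.length : Int) - 1) 2).map
      (fun i => (PySem.List.pyGet? fine i).getD "")
    PySem.Str.join "; " (coarse_labels ++ fine_labels) ++ ";\n"
  else if PySem.Str.isIn "the label for " label then
    let t1 := (PySem.List.pyGet? ((PySem.Str.split? label "the label for ").getD []) 1).getD ""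
    let t2 := (PySem.List.pyGet? ((PySem.Str.split? t1 ".").getD []) 0).getD ""
    let tokens := (PySem.Str.split? t2 "\"").getD []
    PySem.Str.join "; " ((PySem.List.pyRange 1 ((tokens.length : Int) - 1) 2).map
      (fun i => (PySem.List.pyGet? tokens i).getD "")) ++ ";\n"
  else
    PySem.Str.strip label ++ "\n"

-- ===== PORT B =====
-- the `for ch in s` state machine of Source B's _quoted: inq = inside quotes, buf = current content
-- (kept reversed, as the accumulator), acc = emitted contents (reversed)
def pvScan : List Char → Bool → List Char → List String → List String
  | [], _inq, _buf, acc => acc.reverse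
  | c :: cs, inq, buf, acc =>
    if c = '"' then
      if inq then pvScan cs false [] (String.ofList buf.reverse :: acc)
      else pvScan cs true [] acc
    else if inq then pvScan cs inq (c :: buf) acc
    else pvScan cs inq buf acc

def pvQuoted (s : String) : List String := pvScan s.toList false [] []

def label_cleaning_alt (label : String) : String :=
  if PySem.Str.isIn "[label]" label && PySem.Str.isIn "[/label]" label then
    PySem.Str.join "; " (pvQuoted label) ++ ";\n"
  else if PySem.Str.isIn "coarse-grained " label && PySem.Str.isIn "fine-grained " label then
    let coarse := (PySem.List.pyGet? ((PySem.Str.split?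
      ((PySem.List.pyGet? ((PySem.Str.split? label "coarse-grained ").getD []) 1).getD "")
      "fine-grained ").getD []) 0).getD ""
    let fine := (PySem.List.pyGet? ((PySem.Str.split?
      ((PySem.List.pyGet? ((PySem.Str.split? label "fine-grained ").getD []) 1).getD "")
      ".").getD []) 0).getD ""
    PySem.Str.join "; " (pvQuoted coarse ++ pvQuoted fine) ++ ";\n"
  else if PySem.Str.isIn "the label for " label then
    PySem.Str.join "; " (pvQuoted ((PySem.List.pyGet? ((PySem.Str.split?
      ((PySem.List.pyGet? ((PySem.Str.split? label "the label for ").getD []) 1).getD "")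
      ".").getD []) 0).getD "")) ++ ";\n"
  else
    PySem.Str.strip label ++ "\n"

-- ===== PRECONDITION & SPEC =====
def Spec_label_cleaning (label : String) (out : String) : Prop := out = label_cleaning_alt label
instance (label : String) (out : String) : Decidable (Spec_label_cleaning label out) := by unfold Spec_label_cleaning; infer_instance

-- ===== CLAIM (what is proved, stated in full; the proofs are below) =====
def Claim_equal_label_cleaning : Prop := ∀ (label : String), Dom_label_cleaning label → Spec_label_cleaning label (label_cleaning label)

-- ===== LEMMAS AND PROOFS =====

-- proof-side helpers: charSplit = splitting at '"', gSel = the tokens A's stride-2 range selects,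
-- g2 = what the scanner still emits when already inside a quote with buffer buf
def charSplit : List Char → List (List Char)
  | [] => [[]]
  | c :: rest =>
    if c = '"' then [] :: charSplit rest
    else match charSplit rest with
      | [] => [[c]]
      | h :: t => (c :: h) :: t

def gSel {α : Type} : List α → List α
  | _ :: y :: z :: rest => y :: gSel (z :: rest)
  | _ => []

def g2 (buf : List Char) : List (List Char) → List (List Char)
  | c0 :: c1 :: r => (buf.reverse ++ c0) :: gSel (c1 :: r)
  | _ => []

def consHead (p : List Char) : List (List Char) → List (List Char)
  | [] => [p]
  | h :: t => (p ++ h) :: t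

theorem charSplit_ne_nil (cs : List Char) : charSplit cs ≠ [] := by
  cases cs with
  | nil => simp [charSplit]
  | cons c rest =>
    simp only [charSplit]
    split
    · simp
    · split <;> simp

theorem go_eq (fuel : Nat) : ∀ (l cur : List Char) (acc : List (List Char)),
    l.length < fuel →
    PySem.Chars.splitOn.go ['"'] fuel l cur acc = acc.reverse ++ consHead cur.reverse (charSplit l) := by
  induction fuel with
  | zero => intro l cur acc h; omega
  | succ fuel ih =>
    intro l cur acc h
    cases l with
    | nil => simp [PySem.Chars.splitOn.go, consHead, charSplit]
    | cons c rest =>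
      by_cases hc : c = '"'
      · subst hc
        have hpre : List.isPrefixOf ['"'] ('"' :: rest) = true := by simp [List.isPrefixOf]
        rw [PySem.Chars.splitOn.go]
        simp only [hpre, if_true, List.length_cons, List.length_nil, List.drop_succ_cons, List.drop_zero]
        rw [ih rest [] (cur.reverse :: acc) (by simpa using Nat.lt_of_succ_lt_succ h)]
        obtain ⟨hh, ht, hct⟩ := List.exists_cons_of_ne_nil (charSplit_ne_nil rest)
        simp [charSplit, hct, consHead]
      · have hpre : List.isPrefixOf ['"'] (c :: rest) = false := by
          simp [List.isPrefixOf]; exact fun hcc => hc hcc.symm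
        rw [PySem.Chars.splitOn.go]
        simp only [hpre, Bool.false_eq_true, if_false]
        rw [ih rest (c :: cur) acc (by simpa using Nat.lt_of_succ_lt_succ h)]
        obtain ⟨hh, ht, hct⟩ := List.exists_cons_of_ne_nil (charSplit_ne_nil rest)
        simp [charSplit, hc, hct, consHead]

theorem splitOn_quote (cs : List Char) : PySem.Chars.splitOn cs ['"'] = charSplit cs := by
  rw [PySem.Chars.splitOn, go_eq (cs.length + 1) cs [] [] (Nat.lt_succ_self _)]
  obtain ⟨hh, ht, hct⟩ := List.exists_cons_of_ne_nil (charSplit_ne_nil cs)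
  simp [hct, consHead]

theorem gSel_head {α : Type} (a b : α) (t : List α) : gSel (a :: t) = gSel (b :: t) := by
  match t with
  | [] => rfl
  | [_] => rfl
  | _ :: _ :: _ => rfl

theorem gSel_map {α β : Type} (f : α → β) (l : List α) : gSel (l.map f) = (gSel l).map f := by
  induction l using gSel.induct with
  | case1 x y z rest ih => simpa [gSel] using ih
  | case2 l h =>
    match l, h with
    | [], _ => rfl
    | [x], _ => rfl
    | [x, y], _ => rfl
    | x :: y :: z :: r, h => exact absurd rfl (h x y z r)

theorem pyRange_two_count (m : Nat) :
    PySem.List.pyRange 1 ((m : Int) - 1) 2 = (List.range ((m - 1) / 2)).map (fun k : Nat => 1 + 2 * (k : Int)) := by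
  unfold PySem.List.pyRange
  simp only [show ¬((2:Int) = 0) from by norm_num, if_false, show (0:Int) < 2 from by norm_num, if_true]
  split_ifs with h
  · have hc : (((m:Int) - 1 - 1 + 2 - 1)/2).toNat = (m-1)/2 := by omega
    rw [hc]
  · have h0 : (m - 1) / 2 = 0 := by omega
    simp [h0]

theorem extract_eq {α : Type} (d : α) (ts : List α) :
    (PySem.List.pyRange 1 ((ts.length : Int) - 1) 2).map (fun i => (PySem.List.pyGet? ts i).getD d) = gSel ts := by
  induction ts using gSel.induct with
  | case1 x y z rest ih =>
    rw [pyRange_two_count] at ih ⊢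
    simp only [List.length_cons] at ih ⊢
    rw [show (rest.length + 1 + 1 + 1 - 1) / 2 = rest.length / 2 + 1 from by omega]
    rw [show (rest.length + 1 - 1) / 2 = rest.length / 2 from by omega] at ih
    rw [List.range_succ_eq_map]
    simp only [List.map_cons, List.map_map]
    rw [show gSel (x :: y :: z :: rest) = y :: gSel (z :: rest) from rfl]
    congr 1
    · norm_num
      rw [show (1:Int) = ((1:Nat):Int) from rfl, PySem.List.pyGet?_natCast]
      rfl
    · rw [← ih, List.map_map]
      apply List.map_congr_left
      intro a _
      simp only [Function.comp_apply]
      rw [show 1 + 2 * ((Nat.succ a : Nat):Int) = ((3 + 2*a : Nat):Int) from by push_cast; ring]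
      rw [show 1 + 2 * ((a : Nat):Int) = ((1 + 2*a : Nat):Int) from by push_cast; ring]
      rw [PySem.List.pyGet?_natCast, PySem.List.pyGet?_natCast]
      rw [show 3 + 2*a = (1 + 2*a) + 1 + 1 from by omega]
      simp [List.getElem?_cons_succ]
  | case2 l h =>
    match l, h with
    | [], _ => rfl
    | [x], _ => rfl
    | [x, y], _ => rfl
    | x :: y :: z :: r, h => exact absurd rfl (h x y z r)

theorem scan_eq (cs : List Char) : ∀ (inq : Bool) (buf : List Char) (acc : List String),
    pvScan cs inq buf acc
      = acc.reverse ++ (if inq then g2 buf (charSplit cs) else gSel (charSplit cs)).map (fun l => String.ofList l) := by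
  induction cs with
  | nil =>
    intro inq buf acc
    cases inq <;> simp [pvScan, charSplit, gSel, g2]
  | cons c cs ih =>
    intro inq buf acc
    obtain ⟨hd, tl, hct⟩ := List.exists_cons_of_ne_nil (charSplit_ne_nil cs)
    by_cases hc : c = '"'
    · subst hc
      cases inq with
      | false =>
        rw [show pvScan ('"' :: cs) false buf acc = pvScan cs true [] acc from by simp [pvScan]]
        rw [ih]
        simp only [charSplit, hct, if_true, if_false, Bool.false_eq_true]
        cases tl <;> simp [gSel, g2]
      | true =>
        rw [show pvScan ('"' :: cs) true buf acc
              = pvScan cs false [] (String.ofList buf.reverse :: acc) from by simp [pvScan]]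
        rw [ih]
        simp only [charSplit, hct, if_true, if_false, Bool.false_eq_true]
        simp [g2, List.append_assoc]
    · cases inq with
      | false =>
        rw [show pvScan (c :: cs) false buf acc = pvScan cs false buf acc from by simp [pvScan, hc]]
        rw [ih]
        simp only [charSplit, hc, if_false, hct, Bool.false_eq_true]
        rw [gSel_head (c :: hd) hd tl]
      | true =>
        rw [show pvScan (c :: cs) true buf acc = pvScan cs true (c :: buf) acc from by simp [pvScan, hc]]
        rw [ih]
        simp only [charSplit, hc, ite_false, hct, if_true]
        cases tl <;> simp [g2]

theorem main_extract (s : String) :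
    (PySem.List.pyRange 1 ((((PySem.Str.split? s "\"").getD []).length : Int) - 1) 2).map
      (fun i => (PySem.List.pyGet? ((PySem.Str.split? s "\"").getD []) i).getD "")
      = pvQuoted s := by
  have h1 : PySem.Chars.split? s.toList ['"'] = some (charSplit s.toList) := by
    simp [PySem.Chars.split?, splitOn_quote]
  have h2 := PySem.Str.split?_map s "\""
  rw [show ("\"" : String).toList = ['"'] from rfl, h1] at h2
  obtain ⟨l, hl, hmap⟩ : ∃ l, PySem.Str.split? s "\"" = some l ∧ l.map String.toList = charSplit s.toList := by
    cases hsp : PySem.Str.split? s "\"" with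
    | none => rw [hsp] at h2; simp at h2
    | some l =>
      rw [hsp] at h2
      simp only [Option.map_some, Option.some.injEq] at h2
      exact ⟨l, rfl, h2⟩
  have hlk : l = (charSplit s.toList).map String.ofList := by
    rw [← hmap, List.map_map]
    have : (String.ofList ∘ String.toList) = id := by
      funext x; simp
    rw [this, List.map_id]
  rw [hl]
  simp only [Option.getD_some, hlk]
  rw [extract_eq, gSel_map]
  unfold pvQuoted
  rw [scan_eq]
  simp

-- ===== VERDICT (by name: the statement is the Claim_ definition above) =====
theorem label_cleaning_spec : Claim_equal_label_cleaning := by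
  intro label _
  unfold Spec_label_cleaning label_cleaning label_cleaning_alt
  simp only [main_extract]
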